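-- pv_equiv track=rewrite | github.com/Srinivas-18/VPN-Detection-De-anonymization-Tool | deanon/traffic_correlation.py | _detect_mtu_patterns
-- ===== SOURCE A (Python) =====
-- from typing import Dict, List, Tuple, Optional
--
-- def _detect_mtu_patterns(sizes: List[int]) -> Dict:
--     """Detect MTU and fragmentation patterns"""
--     if not sizes:
--         return {}
--
--     # Common MTU sizes
--     common_mtus = [1500, 1492, 1460, 576, 1280, 9000]
--
--     mtu_analysis = {}
--     for mtu in common_mtus:
--         near_mtu = len([s for s in sizes if abs(s - mtu) <= 40])
--         mtu_analysis[f'mtu_{mtu}'] = near_mtu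
--
--     return mtu_analysis
-- ===== SOURCE B (Python) =====
-- from typing import Dict, List
--
-- def _detect_mtu_patterns(sizes: List[int]) -> Dict:
--     """Detect MTU and fragmentation patterns (single pass over sizes)."""
--     if not sizes:
--         return {}
--
--     c1500 = c1492 = c1460 = c576 = c1280 = c9000 = 0
--     for s in sizes:
--         if 1460 <= s <= 1540:
--             c1500 += 1
--         if 1452 <= s <= 1532:
--             c1492 += 1
--         if 1420 <= s <= 1500:
--             c1460 += 1
--         if 536 <= s <= 616:
--             c576 += 1
--         if 1240 <= s <= 1320:
--             c1280 += 1
--         if 8960 <= s <= 9040: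
--             c9000 += 1
--
--     return {
--         'mtu_1500': c1500,
--         'mtu_1492': c1492,
--         'mtu_1460': c1460,
--         'mtu_576': c576,
--         'mtu_1280': c1280,
--         'mtu_9000': c9000,
--     }
-- ===== Notes on version B (the rewrite author's own statement) =====
-- stated objective: faster
-- what changed: Instead of six separate full scans of sizes (one list comprehension per MTU), B makes a single pass over sizes maintaining six counters with precomputed inclusive bands, then assembles the dict from the counters.
import Mathlib
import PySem

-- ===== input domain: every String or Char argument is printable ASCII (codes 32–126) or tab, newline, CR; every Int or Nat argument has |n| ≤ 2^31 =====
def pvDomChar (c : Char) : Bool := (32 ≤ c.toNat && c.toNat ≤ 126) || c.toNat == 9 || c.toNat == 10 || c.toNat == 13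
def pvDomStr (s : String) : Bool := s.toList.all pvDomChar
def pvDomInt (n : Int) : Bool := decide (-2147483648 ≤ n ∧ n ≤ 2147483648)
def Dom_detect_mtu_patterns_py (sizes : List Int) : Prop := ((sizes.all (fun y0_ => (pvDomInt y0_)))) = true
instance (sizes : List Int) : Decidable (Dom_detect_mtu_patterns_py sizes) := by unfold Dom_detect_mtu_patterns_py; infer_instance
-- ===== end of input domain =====

-- B replaces A's six full scans of `sizes` (one per MTU) by a single pass maintaining six
-- band counters; objective: alternative (one traversal instead of six, same asymptotic cost).


-- ===== PORT A =====
-- A: if not sizes: return {}; then for each mtu in the literal list, count |s - mtu| <= 40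
-- over the whole list and insert under key f'mtu_{mtu}'.
def detect_mtu_patterns_py (sizes : List Int) : List (String × Int) :=
  if sizes = [] then []
  else
    let common_mtus : List Int := [1500, 1492, 1460, 576, 1280, 9000]
    let mtu_analysis : PySem.Dict String Int :=
      common_mtus.foldl (fun d mtu =>
        let near_mtu : Int := ((sizes.filter (fun s => decide (|s - mtu| ≤ 40))).length : Int)
        d.insert ("mtu_" ++ PySem.Int.toStr mtu) near_mtu) (PySem.Dict.empty)
    mtu_analysis.items

-- ===== PORT B =====
-- B: single fold over sizes carrying the six counters, then a literal assoc list.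
def detect_mtu_patterns_py_alt (sizes : List Int) : List (String × Int) :=
  if sizes = [] then []
  else
    let cs : Int × Int × Int × Int × Int × Int :=
      sizes.foldl (fun (c : Int × Int × Int × Int × Int × Int) (s : Int) =>
        let (c1500, c1492, c1460, c576, c1280, c9000) := c
        let c1500 := if 1460 ≤ s ∧ s ≤ 1540 then c1500 + 1 else c1500
        let c1492 := if 1452 ≤ s ∧ s ≤ 1532 then c1492 + 1 else c1492
        let c1460 := if 1420 ≤ s ∧ s ≤ 1500 then c1460 + 1 else c1460
        let c576  := if 536  ≤ s ∧ s ≤ 616  then c576 + 1 else c576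
        let c1280 := if 1240 ≤ s ∧ s ≤ 1320 then c1280 + 1 else c1280
        let c9000 := if 8960 ≤ s ∧ s ≤ 9040 then c9000 + 1 else c9000
        (c1500, c1492, c1460, c576, c1280, c9000)) (0, 0, 0, 0, 0, 0)
    let (c1500, c1492, c1460, c576, c1280, c9000) := cs
    [("mtu_1500", c1500), ("mtu_1492", c1492), ("mtu_1460", c1460),
     ("mtu_576", c576), ("mtu_1280", c1280), ("mtu_9000", c9000)]

-- ===== PRECONDITION & SPEC =====
def Spec_detect_mtu_patterns_py (sizes : List Int) (out : List (String × Int)) : Prop := out = detect_mtu_patterns_py_alt sizes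
instance (sizes : List Int) (out : List (String × Int)) : Decidable (Spec_detect_mtu_patterns_py sizes out) := by unfold Spec_detect_mtu_patterns_py; infer_instance

-- ===== CLAIM (what is proved, stated in full; the proofs are below) =====
def Claim_equal_detect_mtu_patterns_py : Prop := ∀ (sizes : List Int), Dom_detect_mtu_patterns_py sizes → Spec_detect_mtu_patterns_py sizes (detect_mtu_patterns_py sizes)

-- ===== LEMMAS AND PROOFS =====

-- B's fold computes, componentwise, the six band counts added to the accumulator.
theorem alt_fold_counts (sizes : List Int) (a b c d e f : Int) :
    sizes.foldl (fun (c : Int × Int × Int × Int × Int × Int) (s : Int) =>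
        let (c1500, c1492, c1460, c576, c1280, c9000) := c
        let c1500 := if 1460 ≤ s ∧ s ≤ 1540 then c1500 + 1 else c1500
        let c1492 := if 1452 ≤ s ∧ s ≤ 1532 then c1492 + 1 else c1492
        let c1460 := if 1420 ≤ s ∧ s ≤ 1500 then c1460 + 1 else c1460
        let c576  := if 536  ≤ s ∧ s ≤ 616  then c576 + 1 else c576
        let c1280 := if 1240 ≤ s ∧ s ≤ 1320 then c1280 + 1 else c1280
        let c9000 := if 8960 ≤ s ∧ s ≤ 9040 then c9000 + 1 else c9000
        (c1500, c1492, c1460, c576, c1280, c9000)) (a, b, c, d, e, f)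
    = (a + ((sizes.filter (fun s => decide (|s - 1500| ≤ 40))).length : Int),
       b + ((sizes.filter (fun s => decide (|s - 1492| ≤ 40))).length : Int),
       c + ((sizes.filter (fun s => decide (|s - 1460| ≤ 40))).length : Int),
       d + ((sizes.filter (fun s => decide (|s - 576| ≤ 40))).length : Int),
       e + ((sizes.filter (fun s => decide (|s - 1280| ≤ 40))).length : Int),
       f + ((sizes.filter (fun s => decide (|s - 9000| ≤ 40))).length : Int)) := by
  induction sizes generalizing a b c d e f with
  | nil => simp
  | cons x xs ih =>
    simp only [List.foldl_cons, List.filter_cons]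
    rw [ih]
    have h1 : (1460 ≤ x ∧ x ≤ 1540) ↔ |x - 1500| ≤ 40 := by rw [abs_le]; omega
    have h2 : (1452 ≤ x ∧ x ≤ 1532) ↔ |x - 1492| ≤ 40 := by rw [abs_le]; omega
    have h3 : (1420 ≤ x ∧ x ≤ 1500) ↔ |x - 1460| ≤ 40 := by rw [abs_le]; omega
    have h4 : (536 ≤ x ∧ x ≤ 616) ↔ |x - 576| ≤ 40 := by rw [abs_le]; omega
    have h5 : (1240 ≤ x ∧ x ≤ 1320) ↔ |x - 1280| ≤ 40 := by rw [abs_le]; omega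
    have h6 : (8960 ≤ x ∧ x ≤ 9040) ↔ |x - 9000| ≤ 40 := by rw [abs_le]; omega
    simp only [h1, h2, h3, h4, h5, h6]
    by_cases g1 : |x - 1500| ≤ 40 <;> by_cases g2 : |x - 1492| ≤ 40 <;>
      by_cases g3 : |x - 1460| ≤ 40 <;> by_cases g4 : |x - 576| ≤ 40 <;>
      by_cases g5 : |x - 1280| ≤ 40 <;> by_cases g6 : |x - 9000| ≤ 40 <;>
      simp [g1, g2, g3, g4, g5, g6] <;> omega

-- ===== VERDICT (by name: the statement is the Claim_ definition above) =====
theorem detect_mtu_patterns_py_spec : Claim_equal_detect_mtu_patterns_py := by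
  intro sizes _
  unfold Spec_detect_mtu_patterns_py detect_mtu_patterns_py detect_mtu_patterns_py_alt
  by_cases h : sizes = []
  · simp [h]
  · simp only [h, if_false]
    rw [alt_fold_counts]
    have k1 : "mtu_" ++ PySem.Int.toStr 1500 = "mtu_1500" := by decide
    have k2 : "mtu_" ++ PySem.Int.toStr 1492 = "mtu_1492" := by decide
    have k3 : "mtu_" ++ PySem.Int.toStr 1460 = "mtu_1460" := by decide
    have k4 : "mtu_" ++ PySem.Int.toStr 576 = "mtu_576" := by decide
    have k5 : "mtu_" ++ PySem.Int.toStr 1280 = "mtu_1280" := by decide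
    have k6 : "mtu_" ++ PySem.Int.toStr 9000 = "mtu_9000" := by decide
    simp only [List.foldl_cons, List.foldl_nil, k1, k2, k3, k4, k5, k6]
    simp [PySem.Dict.insert, PySem.Dict.contains, PySem.Dict.empty]
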